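-- pv_equiv track=rewrite | github.com/Guiyacio/IAS21 | Busqueda anchura.py | busqueda_anchura
-- ===== SOURCE A (Python) =====
-- from collections import deque
--
-- def busqueda_anchura(B, A):
--     # Se utiliza una cola para realizar la exploración de los nodos
--     cola = deque()
--
--     # Se comienza agregando el nodo inicial a la cola junto con una lista vacía que
--     # representa el camino recorrido hasta el momento.
--
--     #Se agrega el nodo inicial a la cola
--     cola.append((B, []))  # (valor de B, lista de movimientos)
--
--     # Se realiza un bucle donde se extrae el primer nodo de la cola y se verifica
--     # si es el nodo deseado. Si lo es, se retorna el camino recorrido hasta ese punto.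
--     # Si el nodo extraído no es el deseado, se generan dos posibles movimientos:
--     # uno hacia la izquierda y otro hacia la derecha. Estos movimientos se agregan a la
--     # cola junto con el camino actualizado, que incluye el movimiento realizado.
--     #
--     # El bucle continúa extrayendo nodos de la cola y explorando sus movimientos
--     # hasta encontrar el nodo deseado o hasta que la cola se quede vacía, lo que
--     # indicaría que no se encontró una solución.
--
--     while cola:
--         # Se obtene el siguiente nodo de la cola
--         nodo, movimientos = cola.popleft()
--
--         # Se verificar si se ha alcanzado la posición de A
--         if nodo == A:
--             # Se ha encontrado la posición de A, se retornan los movimientos realizados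
--             return movimientos
--
--         # Se generan los movimientos posibles
--         movimientos_posibles = [nodo-1, nodo+1]
--
--         # Se agregan los movimientos posibles a la cola
--         for movimiento in movimientos_posibles:
--             cola.append((movimiento, movimientos + [movimiento]))
--
--     # Si no se encuentra la posición, retornar None
--     return None
-- ===== SOURCE B (Python) =====
-- def busqueda_anchura(B, A):
--     # The shortest +-1 path from B to A is the monotonic walk; BFS would
--     # return exactly its node sequence, so generate it directly.
--     step = 1 if A >= B else -1
--     return list(range(B + step, A + step, step))
-- ===== Notes on version B (the rewrite author's own statement) =====
-- stated objective: alternative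
-- what changed: Replaces the breadth-first search over the binary +-1 move tree by directly generating the monotonic node sequence from B to A with one range() call.
import Mathlib
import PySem

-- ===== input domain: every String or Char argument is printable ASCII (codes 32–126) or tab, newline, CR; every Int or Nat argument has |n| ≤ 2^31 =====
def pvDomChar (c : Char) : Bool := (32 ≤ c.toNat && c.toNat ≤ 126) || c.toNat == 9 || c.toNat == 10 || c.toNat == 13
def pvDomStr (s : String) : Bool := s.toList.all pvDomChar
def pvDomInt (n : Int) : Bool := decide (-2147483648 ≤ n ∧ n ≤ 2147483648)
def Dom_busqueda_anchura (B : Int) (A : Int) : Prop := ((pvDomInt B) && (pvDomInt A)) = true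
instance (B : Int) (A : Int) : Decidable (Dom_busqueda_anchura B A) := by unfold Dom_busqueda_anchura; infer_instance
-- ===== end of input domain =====

-- B replaces A's breadth-first search over the binary ±1 move tree by directly
-- generating the monotonic node sequence from B to A (objective: alternative).

-- ===== PORT A =====
-- Literal port of the while-loop BFS. The queue holds (nodo, movimientos) pairs;
-- each iteration pops the head, tests the node against A, otherwise appends the
-- two children. `fuel` is only a totality guard for the unbounded while loop:
-- 2^(|A-B|+1) iterations suffice (the equivalence theorem below in particular
-- shows the loop returns `some` within this bound, exactly as the Python loop
-- always returns).
def bfsLoop (A : Int) : Nat → List (Int × List Int) → Option (List Int)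
  | 0, _ => none
  | _ + 1, [] => none
  | fuel + 1, (nodo, movimientos) :: cola =>
    if nodo = A then some movimientos
    else bfsLoop A fuel
      (cola ++ [(nodo - 1, movimientos ++ [nodo - 1]), (nodo + 1, movimientos ++ [nodo + 1])])

def busqueda_anchura (B : Int) (A : Int) : Option (List Int) :=
  bfsLoop A (2 ^ ((A - B).natAbs + 1)) [(B, [])]

-- ===== PORT B =====
def busqueda_anchura_alt (B : Int) (A : Int) : Option (List Int) :=
  let step : Int := if A ≥ B then 1 else -1
  some (PySem.List.pyRange (B + step) (A + step) step)

-- ===== PRECONDITION & SPEC =====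
def Spec_busqueda_anchura (B : Int) (A : Int) (out : Option (List Int)) : Prop := out = busqueda_anchura_alt B A
instance (B : Int) (A : Int) (out : Option (List Int)) : Decidable (Spec_busqueda_anchura B A out) := by unfold Spec_busqueda_anchura; infer_instance

-- ===== CLAIM (what is proved, stated in full; the proofs are below) =====
def Claim_equal_busqueda_anchura : Prop := ∀ (B : Int) (A : Int), Dom_busqueda_anchura B A → Spec_busqueda_anchura B A (busqueda_anchura B A)

-- ===== LEMMAS AND PROOFS =====

-- The BFS tree is the infinite binary tree of ±1 move sequences; number its
-- vertices heap-style by k ≥ 1 (root 1, children of k are 2k and 2k+1).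
-- `np B k` = (node value, move list) of vertex k.
def np (B : Int) (k : Nat) : Int × List Int :=
  if _h : k ≤ 1 then (B, [])
  else
    let p := np B (k / 2)
    let s : Int := if k % 2 = 0 then -1 else 1
    (p.1 + s, p.2 ++ [p.1 + s])
termination_by k
decreasing_by omega

lemma np_one (B : Int) : np B 1 = (B, []) := by rw [np]; simp

lemma np_even (B : Int) (k : Nat) (hk : 1 ≤ k) :
    np B (2 * k) = ((np B k).1 - 1, (np B k).2 ++ [(np B k).1 - 1]) := by
  rw [np, dif_neg (by omega : ¬ 2 * k ≤ 1)]
  have h2 : 2 * k / 2 = k := by omega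
  have h3 : 2 * k % 2 = 0 := by omega
  simp [h2, h3, sub_eq_add_neg]

lemma np_odd (B : Int) (k : Nat) (hk : 1 ≤ k) :
    np B (2 * k + 1) = ((np B k).1 + 1, (np B k).2 ++ [(np B k).1 + 1]) := by
  rw [np, dif_neg (by omega : ¬ 2 * k + 1 ≤ 1)]
  have h2 : (2 * k + 1) / 2 = k := by omega
  have h3 : (2 * k + 1) % 2 = 1 := by omega
  simp [h2, h3]

-- Linear search over vertices in heap order, starting at vertex k.
def search (B A : Int) : Nat → Nat → Option (List Int)
  | 0, _ => none
  | fuel + 1, k => if (np B k).1 = A then some (np B k).2 else search B A fuel (k + 1)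

-- BFS on the queue of vertices [k, ..., 2k-1] is the linear heap-order search.
lemma bfsLoop_eq_search (B A : Int) (fuel : Nat) :
    ∀ k, 1 ≤ k → bfsLoop A fuel ((List.range' k k).map (np B)) = search B A fuel k := by
  induction fuel with
  | zero => intro k hk; rfl
  | succ fuel ih =>
    intro k hk
    have hr : List.range' k k = k :: List.range' (k + 1) (k - 1) := by
      cases k with
      | zero => omega
      | succ n => simp [List.range'_succ]
    rw [hr]
    simp only [List.map_cons, bfsLoop, search]
    split
    · rfl
    · have happ : List.range' (k + 1) (k - 1) ++ [2 * k, 2 * k + 1] = List.range' (k + 1) (k + 1) := by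
        have h := @List.range'_append (k + 1) (k - 1) 2 1
        have e1 : k + 1 + 1 * (k - 1) = 2 * k := by omega
        have e2 : k - 1 + 2 = k + 1 := by omega
        have e3 : List.range' (2 * k) 2 = [2 * k, 2 * k + 1] := by simp [List.range'_succ]
        rw [e1, e2, e3] at h
        exact h
      have hmap : (List.range' (k + 1) (k - 1)).map (np B) ++
          [((np B k).1 - 1, (np B k).2 ++ [(np B k).1 - 1]),
           ((np B k).1 + 1, (np B k).2 ++ [(np B k).1 + 1])] =
          (List.range' (k + 1) (k + 1)).map (np B) := by
        rw [← happ, List.map_append]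
        simp [np_even B k hk, np_odd B k hk]
      rw [hmap, ih (k + 1) (by omega)]

-- If the first vertex (in heap order from k) whose node equals A is k + n,
-- the search returns its move list.
lemma search_finds (B A : Int) :
    ∀ n k fuel, (∀ j, k ≤ j → j < k + n → (np B j).1 ≠ A) → (np B (k + n)).1 = A →
      n + 1 ≤ fuel → search B A fuel k = some ((np B (k + n)).2) := by
  intro n
  induction n with
  | zero =>
    intro k fuel _ hA hf
    cases fuel with
    | zero => omega
    | succ f =>
      simp only [Nat.add_zero] at hA ⊢
      simp [search, hA]
  | succ n ih =>
    intro k fuel hne hA hf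
    cases fuel with
    | zero => omega
    | succ f =>
      simp only [search]
      rw [if_neg (hne k (le_refl k) (by omega))]
      have := ih (k + 1) f (fun j h1 h2 => hne j (by omega) (by omega))
        (by rw [show k + 1 + n = k + (n + 1) by omega]; exact hA) (by omega)
      rw [this, show k + 1 + n = k + (n + 1) by omega]

lemma log2_div2 (k : Nat) (h : 2 ≤ k) : Nat.log2 k = Nat.log2 (k / 2) + 1 := by
  rw [Nat.log2_eq_log_two, Nat.log2_eq_log_two, Nat.log_div_base]
  have := Nat.log_pos (by omega : 1 < 2) (by omega : 2 ≤ k)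
  omega

-- node value is at least B - log2 k.
lemma np_fst_ge (B : Int) : ∀ k, 1 ≤ k → B - Nat.log2 k ≤ (np B k).1 := by
  intro k
  induction k using Nat.strong_induction_on with
  | _ k ih =>
    intro hk
    rcases Nat.lt_or_ge k 2 with h2 | h2
    · interval_cases k
      have h0 : Nat.log2 1 = 0 := by rw [Nat.log2_eq_log_two]; simp
      simp [np_one, h0]
    · have ihh := ih (k / 2) (by omega) (by omega)
      rw [np, dif_neg (by omega : ¬ k ≤ 1), log2_div2 k h2]
      dsimp only
      split_ifs <;> (push_cast at ihh ⊢) <;> omega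

-- node value is at most B + log2 k, with equality only at the all-ones vertex.
lemma np_fst_le (B : Int) : ∀ k, 1 ≤ k →
    (np B k).1 ≤ B + Nat.log2 k ∧ ((np B k).1 = B + Nat.log2 k → k = 2 ^ (Nat.log2 k + 1) - 1) := by
  intro k
  induction k using Nat.strong_induction_on with
  | _ k ih =>
    intro hk
    rcases Nat.lt_or_ge k 2 with h2 | h2
    · interval_cases k
      have h0 : Nat.log2 1 = 0 := by rw [Nat.log2_eq_log_two]; simp
      simp [np_one, h0]
    · obtain ⟨ihle, iheq⟩ := ih (k / 2) (by omega) (by omega)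
      rw [np, dif_neg (by omega : ¬ k ≤ 1), log2_div2 k h2]
      dsimp only
      split_ifs with hpar
      · constructor
        · push_cast; omega
        · intro heq; exfalso; push_cast at heq; omega
      · constructor
        · push_cast; omega
        · intro heq
          have hfst : (np B (k / 2)).1 = B + Nat.log2 (k / 2) := by
            push_cast at heq; omega
          have hk2 := iheq hfst
          have hpow : 1 ≤ 2 ^ (Nat.log2 (k / 2) + 1) := Nat.one_le_two_pow
          have hodd : k = 2 * (k / 2) + 1 := by omega
          have hp : 2 ^ (Nat.log2 (k / 2) + 1 + 1) = 2 * 2 ^ (Nat.log2 (k / 2) + 1) := by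
            rw [pow_succ]; ring
          omega

-- log2 k < d ↔ k < 2^d (for k ≥ 1).
lemma log2_lt_iff (k d : Nat) (hk : 1 ≤ k) : Nat.log2 k < d ↔ k < 2 ^ d := by
  rw [Nat.log2_eq_log_two]
  exact Nat.log_lt_iff_lt_pow (by omega) (by omega)

-- appending one more step to a countdown range.
lemma pyRange_neg_succ_right (a b : Int) (h : b ≤ a) :
    PySem.List.pyRange a (b - 1) (-1) = PySem.List.pyRange a b (-1) ++ [b] := by
  rw [PySem.List.pyRange_neg_one_eq_reverse, PySem.List.pyRange_neg_one_eq_reverse]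
  rw [show b - 1 + 1 = b by ring]
  rw [PySem.List.pyRange_one_cons (by omega : b < a + 1)]
  simp

-- the all-zeros vertex 2^d: walk d steps down-left.
lemma np_all_zeros (B : Int) : ∀ d : Nat, np B (2 ^ d) = (B - d, PySem.List.pyRange (B - 1) (B - 1 - d) (-1)) := by
  intro d
  induction d with
  | zero =>
    simp [np_one, PySem.List.pyRange_neg_one_eq_nil (le_refl (B - 1))]
  | succ d ih =>
    rw [pow_succ, mul_comm, np_even B (2 ^ d) Nat.one_le_two_pow, ih]
    simp only [Prod.mk.injEq]
    refine ⟨?_, ?_⟩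
    · push_cast; ring
    · rw [show (B - 1 - ((d : Nat) + 1 : Nat) : Int) = (B - 1 - d) - 1 by push_cast; ring]
      rw [pyRange_neg_succ_right (B - 1) (B - 1 - d) (by omega)]
      congr 2
      omega

-- the all-ones vertex 2^(d+1) - 1: walk d steps down-right.
lemma np_all_ones (B : Int) : ∀ d : Nat, np B (2 ^ (d + 1) - 1) = (B + d, PySem.List.pyRange (B + 1) (B + 1 + d) 1) := by
  intro d
  induction d with
  | zero =>
    simp [np_one, PySem.List.pyRange_one_eq_nil (le_refl (B + 1))]
  | succ d ih =>
    have h1 : 1 ≤ 2 ^ (d + 1) - 1 := by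
      have : 2 ≤ 2 ^ (d + 1) := Nat.one_lt_two_pow_iff.mpr (by omega)
      omega
    have h2 : 2 ^ (d + 1 + 1) - 1 = 2 * (2 ^ (d + 1) - 1) + 1 := by
      have : 2 ≤ 2 ^ (d + 1) := Nat.one_lt_two_pow_iff.mpr (by omega)
      rw [pow_succ]; omega
    rw [h2, np_odd B _ h1, ih]
    simp only [Prod.mk.injEq]
    refine ⟨?_, ?_⟩
    · push_cast; ring
    · rw [show (B + 1 + ((d : Nat) + 1 : Nat) : Int) = (B + 1 + d) + 1 by push_cast; ring]
      rw [PySem.List.pyRange_one_succ_right (by omega : (B + 1 : Int) ≤ B + 1 + d)]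
      congr 2
      ring

-- ===== VERDICT (by name: the statement is the Claim_ definition above) =====
theorem busqueda_anchura_spec : Claim_equal_busqueda_anchura := by
  unfold Claim_equal_busqueda_anchura Spec_busqueda_anchura
  intro B A _
  unfold busqueda_anchura busqueda_anchura_alt
  have hq : [((B : Int), ([] : List Int))] = (List.range' 1 1).map (np B) := by simp [np_one]
  rw [hq, bfsLoop_eq_search B A _ 1 (le_refl 1)]
  rcases lt_trichotomy A B with hlt | heq | hgt
  · -- A < B: the first hit (heap order) is the all-zeros vertex 2^d, d = B - A
    set d : Nat := (A - B).natAbs with hd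
    have hdA : (A : Int) = B - (d : Int) := by omega
    have hpos : 1 ≤ 2 ^ d := Nat.one_le_two_pow
    have hne : ∀ j, 1 ≤ j → j < 1 + (2 ^ d - 1) → (np B j).1 ≠ A := by
      intro j hj1 hj2 hcontra
      have hlog : Nat.log2 j < d := (log2_lt_iff j d hj1).mpr (by omega)
      have := np_fst_ge B j hj1
      rw [hcontra, hdA] at this
      omega
    have hA' : (np B (1 + (2 ^ d - 1))).1 = A := by
      rw [show 1 + (2 ^ d - 1) = 2 ^ d by omega, np_all_zeros, hdA]
    rw [search_finds B A (2 ^ d - 1) 1 _ hne hA'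
      (by have : 2 ^ d ≤ 2 ^ (d + 1) := Nat.pow_le_pow_right (by omega) (by omega); omega)]
    rw [show 1 + (2 ^ d - 1) = 2 ^ d by omega, np_all_zeros]
    rw [if_neg (by omega : ¬ A ≥ B)]
    simp only
    rw [show (B + -1 : Int) = B - 1 by ring, show (A + -1 : Int) = B - 1 - (d : Int) by omega]
  · -- A = B: the root hits immediately, both paths are empty
    subst heq
    have h1 : 1 ≤ 2 ^ ((A - A).natAbs + 1) := Nat.one_le_two_pow
    cases hf : 2 ^ ((A - A).natAbs + 1) with
    | zero => omega
    | succ f =>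
      simp [search, np_one, PySem.List.pyRange_one_eq_nil (le_refl (A + 1))]
  · -- A > B: the first hit is the all-ones vertex 2^(d+1) - 1, d = A - B
    set d : Nat := (A - B).natAbs with hd
    have hdA : (A : Int) = B + (d : Int) := by omega
    have h2d : 2 ≤ 2 ^ (d + 1) := Nat.one_lt_two_pow_iff.mpr (by omega)
    have hne : ∀ j, 1 ≤ j → j < 1 + (2 ^ (d + 1) - 1 - 1) → (np B j).1 ≠ A := by
      intro j hj1 hj2 hcontra
      obtain ⟨hle, heq⟩ := np_fst_le B j hj1
      have hlogle : Nat.log2 j < d + 1 := (log2_lt_iff j (d + 1) hj1).mpr (by omega)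
      rcases Nat.lt_or_ge (Nat.log2 j) d with hl | hl
      · rw [hcontra, hdA] at hle; omega
      · have hlog : Nat.log2 j = d := by omega
        have : j = 2 ^ (d + 1) - 1 := by
          have := heq (by rw [hcontra, hdA, hlog])
          rw [hlog] at this; exact this
        omega
    have hA' : (np B (1 + (2 ^ (d + 1) - 1 - 1))).1 = A := by
      rw [show 1 + (2 ^ (d + 1) - 1 - 1) = 2 ^ (d + 1) - 1 by omega, np_all_ones, hdA]
    rw [search_finds B A (2 ^ (d + 1) - 1 - 1) 1 _ hne hA' (by omega)]
    rw [show 1 + (2 ^ (d + 1) - 1 - 1) = 2 ^ (d + 1) - 1 by omega, np_all_ones]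
    rw [if_pos (by omega : A ≥ B)]
    simp only
    rw [show (A + 1 : Int) = B + 1 + (d : Int) by omega]
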